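-- pv_equiv track=rewrite | github.com/ctokx/GEOsphere | src/geosphere/collector/robots.py | _rules_status
-- ===== SOURCE A (Python) =====
-- def _rules_status(rules: list[dict[str, str]]) -> str:
--     if any(item["directive"] == "Disallow" and item["path"] == "/" for item in rules):
--         return "blocked"
--     if any(item["directive"] == "Disallow" and item["path"] not in {"", "/"} for item in rules):
--         return "partial"
--     if any(item["directive"] == "Allow" for item in rules):
--         return "allowed"
--     return "neutral"
-- ===== SOURCE B (Python) =====
-- def _rules_status(rules: list[dict[str, str]]) -> str:
--     has_blocked = has_partial = has_allowed = False
--     for item in rules: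
--         directive = item["directive"]
--         if directive == "Disallow":
--             path = item["path"]
--             has_blocked = has_blocked or path == "/"
--             has_partial = has_partial or path not in ("", "/")
--         elif directive == "Allow":
--             has_allowed = True
--     if has_blocked:
--         return "blocked"
--     if has_partial:
--         return "partial"
--     if has_allowed:
--         return "allowed"
--     return "neutral"
-- ===== Notes on version B (the rewrite author's own statement) =====
-- stated objective: alternative
-- what changed: B replaces A's three separate short-circuiting any() scans with a single pass that accumulates three boolean flags and then decides by priority.
-- outside the precondition, e.g. on _rules_status([{'directive': 'Disallow', 'path': '/'}, {}]): A returns 'blocked', B raises KeyError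
import Mathlib
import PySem

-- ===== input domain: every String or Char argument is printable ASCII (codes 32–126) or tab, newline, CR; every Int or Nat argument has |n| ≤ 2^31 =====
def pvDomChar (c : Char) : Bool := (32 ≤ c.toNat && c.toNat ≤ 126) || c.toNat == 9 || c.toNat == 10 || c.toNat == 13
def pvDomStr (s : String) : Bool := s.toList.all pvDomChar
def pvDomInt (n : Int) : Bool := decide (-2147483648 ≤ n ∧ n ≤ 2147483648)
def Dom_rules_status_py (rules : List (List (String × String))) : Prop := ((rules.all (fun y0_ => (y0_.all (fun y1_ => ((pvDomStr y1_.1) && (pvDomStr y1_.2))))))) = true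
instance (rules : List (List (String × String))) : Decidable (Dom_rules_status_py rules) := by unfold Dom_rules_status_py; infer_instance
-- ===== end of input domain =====

-- B is a single-pass re-implementation with three flags; same return values on Pre_.
-- ===== PORT A =====
-- dict lookup item[k]: first match in the association list; "" never occurs since Pre_ guarantees the key exists (KeyError inputs are outside Pre_).
def pvDGet (item : List (String × String)) (k : String) : String :=
  ((item.find? (fun p => p.1 == k)).map (·.2)).getD ""

def rules_status_py (rules : List (List (String × String))) : String :=
  if rules.any (fun item => pvDGet item "directive" == "Disallow" && pvDGet item "path" == "/") then "blocked"
  else if rules.any (fun item => pvDGet item "directive" == "Disallow" && !(pvDGet item "path" == "" || pvDGet item "path" == "/")) then "partial"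
  else if rules.any (fun item => pvDGet item "directive" == "Allow") then "allowed"
  else "neutral"

-- ===== PORT B =====
def pvStep (st : Bool × Bool × Bool) (item : List (String × String)) : Bool × Bool × Bool :=
  let directive := pvDGet item "directive"
  if directive == "Disallow" then
    let path := pvDGet item "path"
    (st.1 || (path == "/"), st.2.1 || !(path == "" || path == "/"), st.2.2)
  else if directive == "Allow" then (st.1, st.2.1, true)
  else st

def rules_status_py_alt (rules : List (List (String × String))) : String :=
  let flags := rules.foldl pvStep (false, false, false)
  if flags.1 then "blocked"
  else if flags.2.1 then "partial"
  else if flags.2.2 then "allowed"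
  else "neutral"

-- ===== PRECONDITION & SPEC =====
-- Pre_ excludes rules missing the "directive" key, or the "path" key on a Disallow rule: A
-- usually raises KeyError there (it may still return when an earlier rule short-circuits the
-- first scan), while B always reads those keys of every rule and raises.
def Pre_rules_status_py (rules : List (List (String × String))) : Prop :=
  ∀ item ∈ rules, (item.find? (fun p => p.1 == "directive")).isSome = true ∧
    (pvDGet item "directive" = "Disallow" → (item.find? (fun p => p.1 == "path")).isSome = true)
instance (rules : List (List (String × String))) : Decidable (Pre_rules_status_py rules) := by unfold Pre_rules_status_py; infer_instance
def pvWitness_rules_status_py : (List (List (String × String))) := [[("directive", "Allow"), ("path", "/a")]]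

def Spec_rules_status_py (rules : List (List (String × String))) (out : String) : Prop := out = rules_status_py_alt rules
instance (rules : List (List (String × String))) (out : String) : Decidable (Spec_rules_status_py rules out) := by unfold Spec_rules_status_py; infer_instance

-- ===== CLAIM (what is proved, stated in full; the proofs are below) =====
def Claim_equal_rules_status_py : Prop := ∀ (rules : List (List (String × String))), Dom_rules_status_py rules → Pre_rules_status_py rules → Spec_rules_status_py rules (rules_status_py rules)

-- ===== LEMMAS AND PROOFS =====
theorem pvFoldl_flags (rules : List (List (String × String))) (st : Bool × Bool × Bool) :
    rules.foldl pvStep st =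
      (st.1 || rules.any (fun item => pvDGet item "directive" == "Disallow" && pvDGet item "path" == "/"),
       st.2.1 || rules.any (fun item => pvDGet item "directive" == "Disallow" && !(pvDGet item "path" == "" || pvDGet item "path" == "/")),
       st.2.2 || rules.any (fun item => pvDGet item "directive" == "Allow")) := by
  induction rules generalizing st with
  | nil => simp
  | cons hd tl ih =>
      rw [List.foldl_cons, ih]
      simp only [List.any_cons]
      by_cases h1 : pvDGet hd "directive" = "Disallow"
      · have hA : (pvDGet hd "directive" == "Allow") = false := by simp [h1]
        simp [pvStep, h1, hA, Bool.or_assoc]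
      · have hD : (pvDGet hd "directive" == "Disallow") = false := by simp [h1]
        by_cases h2 : pvDGet hd "directive" = "Allow"
        · simp [pvStep, hD, h2, Bool.or_assoc]
        · have hA : (pvDGet hd "directive" == "Allow") = false := by simp [h2]
          simp [pvStep, hD, hA, Bool.or_assoc]

-- ===== VERDICT (by name: the statement is the Claim_ definition above) =====
theorem rules_status_py_spec : Claim_equal_rules_status_py := by
  intro rules _ _
  show rules_status_py rules = rules_status_py_alt rules
  simp only [rules_status_py, rules_status_py_alt, pvFoldl_flags, Bool.false_or]
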